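-- pv_equiv track=rewrite | github.com/JetBrains-Research/commit_message_generation | src/metrics/reused_implementations/log_mnext.py | _match_enums
-- ===== SOURCE A (Python) =====
-- def _match_enums(enum_hypothesis_list, enum_reference_list):
--     """
--     matches exact words in hypothesis and reference and returns
--     a word mapping between enum_hypothesis_list and enum_reference_list
--     based on the enumerated word id.
--     :param enum_hypothesis_list: enumerated hypothesis list
--     :type enum_hypothesis_list: list of tuples
--     :param enum_reference_list: enumerated reference list
--     :type enum_reference_list: list of 2D tuples
--     :return: enumerated matched tuples, enumerated unmatched hypothesis tuples,
--              enumerated unmatched reference tuples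
--     :rtype: list of 2D tuples, list of 2D tuples,  list of 2D tuples
--     """
--     word_match = []
--     for i in range(len(enum_hypothesis_list))[::-1]:
--         for j in range(len(enum_reference_list))[::-1]:
--             if enum_hypothesis_list[i][1] == enum_reference_list[j][1]:
--                 word_match.append(
--                     (enum_hypothesis_list[i][0], enum_reference_list[j][0])
--                 )
--                 (enum_hypothesis_list.pop(i)[1], enum_reference_list.pop(j)[1])
--                 break
--     return word_match, enum_hypothesis_list, enum_reference_list
-- ===== SOURCE B (Python) =====
-- def _match_enums(enum_hypothesis_list, enum_reference_list):
--     # Hash map word -> stack of reference positions; pop the highest per hypothesis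
--     # word, scanning the hypothesis back-to-front.  Same in-place replacement of
--     # both argument lists as the original.
--     positions = {}
--     for j, (_, word) in enumerate(enum_reference_list):
--         positions.setdefault(word, []).append(j)
--     word_match = []
--     kept_hyp = []
--     matched_ref = set()
--     for i in range(len(enum_hypothesis_list) - 1, -1, -1):
--         hid, word = enum_hypothesis_list[i]
--         stack = positions.get(word)
--         if stack:
--             j = stack.pop()
--             matched_ref.add(j)
--             word_match.append((hid, enum_reference_list[j][0]))
--         else:
--             kept_hyp.append(enum_hypothesis_list[i])
--     kept_hyp.reverse()
--     kept_ref = [t for j, t in enumerate(enum_reference_list) if j not in matched_ref]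
--     enum_hypothesis_list[:] = kept_hyp
--     enum_reference_list[:] = kept_ref
--     return word_match, enum_hypothesis_list, enum_reference_list
-- ===== Notes on version B (the rewrite author's own statement) =====
-- stated objective: faster
-- what changed: Replaced the O(n*m) nested backwards scan with in-place pops by a hash map word -> stack of reference positions built in one pass; each hypothesis word (processed back-to-front) pops the highest available position in O(1), and the unmatched lists are rebuilt by a single filter.
import Mathlib
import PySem

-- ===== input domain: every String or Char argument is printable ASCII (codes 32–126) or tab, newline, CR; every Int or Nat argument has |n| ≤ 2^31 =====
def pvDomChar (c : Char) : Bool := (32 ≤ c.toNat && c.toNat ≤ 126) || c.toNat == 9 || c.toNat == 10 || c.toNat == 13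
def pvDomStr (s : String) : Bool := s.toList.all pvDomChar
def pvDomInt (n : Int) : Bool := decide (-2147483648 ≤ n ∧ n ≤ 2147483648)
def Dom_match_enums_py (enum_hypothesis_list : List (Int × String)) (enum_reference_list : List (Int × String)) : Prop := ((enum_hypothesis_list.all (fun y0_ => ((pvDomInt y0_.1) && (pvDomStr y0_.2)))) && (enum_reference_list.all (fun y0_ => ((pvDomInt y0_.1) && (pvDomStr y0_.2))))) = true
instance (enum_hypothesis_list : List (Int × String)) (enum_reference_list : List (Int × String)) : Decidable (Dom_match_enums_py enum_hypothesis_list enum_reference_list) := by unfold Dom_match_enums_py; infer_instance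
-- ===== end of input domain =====

-- B replaces A's O(n*m) nested backwards scans (with in-place pops) by a hash map
-- word -> stack of reference positions, popping the highest position per hypothesis
-- word in O(1) (objective: faster).  Both A and B replace the contents of the two
-- argument lists in place in Python; the equivalence proved here is about the
-- returned triple (which aliases those lists identically in both).

-- ===== PORT A =====
-- one iteration of A's outer loop ('for i in …[::-1]'); state = (hyp, ref, word_match)
def stepA (st : List (Int × String) × List (Int × String) × List (Int × Int)) (i : Int) :
    List (Int × String) × List (Int × String) × List (Int × Int) :=
  let hyp := st.1
  let ref := st.2.1
  let wm := st.2.2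
  let hi := PySem.List.pyGetD hyp i ((0 : Int), "")
  -- inner 'for j in range(len(ref))[::-1]: if …: …; break' = first j from the right that matches
  match (PySem.List.pyRange 0 (PySem.List.len ref)).reverse.find?
      (fun j => (PySem.List.pyGetD ref j ((0 : Int), "")).2 == hi.2) with
  | none => (hyp, ref, wm)
  | some j =>
      let rj := PySem.List.pyGetD ref j ((0 : Int), "")
      match PySem.List.pop? hyp i, PySem.List.pop? ref j with
      | some (_, hyp'), some (_, ref') => (hyp', ref', wm ++ [(hi.1, rj.1)])
      | _, _ => (hyp, ref, wm)   -- unreachable: both indices are in range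

def match_enums_py (enum_hypothesis_list : List (Int × String)) (enum_reference_list : List (Int × String)) : (List (Int × Int)) × (List (Int × String)) × (List (Int × String)) :=
  -- 'range(len(enum_hypothesis_list))[::-1]' is computed once, with the original length
  let st := ((PySem.List.pyRange 0 (PySem.List.len enum_hypothesis_list)).reverse).foldl
      stepA (enum_hypothesis_list, enum_reference_list, [])
  (st.2.2, st.1, st.2.1)

-- ===== PORT B =====
-- one iteration of B's loop; state = (positions, word_match, kept_hyp, matched_ref)
def stepB (h r : List (Int × String))
    (st : PySem.Dict String (List Int) × List (Int × Int) × List (Int × String) × PySem.Set Int)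
    (i : Int) :
    PySem.Dict String (List Int) × List (Int × Int) × List (Int × String) × PySem.Set Int :=
  let pos := st.1
  let wm := st.2.1
  let kept := st.2.2.1
  let matched := st.2.2.2
  let hi := PySem.List.pyGetD h i ((0 : Int), "")
  match pos.getD hi.2 [] with
  | [] => (pos, wm, kept ++ [hi], matched)          -- no stack / empty stack
  | x :: xs =>                                      -- 'j = stack.pop()'
      let j := (x :: xs).getLast (by simp)
      (pos.insert hi.2 (x :: xs).dropLast,
       wm ++ [(hi.1, (PySem.List.pyGetD r j ((0 : Int), "")).1)],
       kept,
       PySem.Set.add matched j)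

def match_enums_py_alt (enum_hypothesis_list : List (Int × String)) (enum_reference_list : List (Int × String)) : (List (Int × Int)) × (List (Int × String)) × (List (Int × String)) :=
  -- positions: word -> list of reference positions (ascending), via setdefault(...).append
  let positions := (PySem.List.enumerate enum_reference_list).foldl
      (fun d p => d.modify p.2.2 [] (· ++ [p.1])) PySem.Dict.empty
  -- 'for i in range(len(h)-1, -1, -1)'
  let st := (PySem.List.pyRange (PySem.List.len enum_hypothesis_list - 1) (-1) (-1)).foldl
      (stepB enum_hypothesis_list enum_reference_list) (positions, [], [], PySem.Set.empty)
  let keptRef := ((PySem.List.enumerate enum_reference_list).filter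
      (fun p => !(PySem.Set.contains st.2.2.2 p.1))).map (·.2)
  (st.2.1, st.2.2.1.reverse, keptRef)

-- ===== PRECONDITION & SPEC =====
def Spec_match_enums_py (enum_hypothesis_list : List (Int × String)) (enum_reference_list : List (Int × String)) (out : (List (Int × Int)) × (List (Int × String)) × (List (Int × String))) : Prop := out = match_enums_py_alt enum_hypothesis_list enum_reference_list
instance (enum_hypothesis_list : List (Int × String)) (enum_reference_list : List (Int × String)) (out : (List (Int × Int)) × (List (Int × String)) × (List (Int × String))) : Decidable (Spec_match_enums_py enum_hypothesis_list enum_reference_list out) := by unfold Spec_match_enums_py; infer_instance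

-- ===== CLAIM (what is proved, stated in full; the proofs are below) =====
def Claim_equal_match_enums_py : Prop := ∀ (enum_hypothesis_list : List (Int × String)) (enum_reference_list : List (Int × String)), Dom_match_enums_py enum_hypothesis_list enum_reference_list → Spec_match_enums_py enum_hypothesis_list enum_reference_list (match_enums_py enum_hypothesis_list enum_reference_list)

-- ===== LEMMAS AND PROOFS =====

-- The common mathematical content: greedy rightmost exact matching, processing the
-- hypothesis back-to-front.
def lastMatch (w : String) : List (Int × String) → Option (Nat × (Int × String))
  | [] => none
  | x :: xs =>
    match lastMatch w xs with
    | some (k, e) => some (k + 1, e)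
    | none => if x.2 == w then some (0, x) else none

def greedy : List (Int × String) → List (Int × String) →
    List (Int × Int) × List (Int × String) × List (Int × String)
  | [], ref => ([], [], ref)
  | h :: t, ref =>
    match lastMatch h.2 ref with
    | some (k, e) =>
        let p := greedy t (ref.eraseIdx k)
        ((h.1, e.1) :: p.1, p.2.1, p.2.2)
    | none =>
        let p := greedy t ref
        (p.1, p.2.1 ++ [h], p.2.2)

def idxs (n : Nat) : List Int := (List.range n).reverse.map Nat.cast

lemma idxs_succ (n : Nat) : idxs (n + 1) = (n : Int) :: idxs n := by
  simp [idxs, List.range_succ]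

-- ---- A-side lemmas ----

lemma findNat (w : String) (d : Int × String) :
    ∀ (ref : List (Int × String)),
      (List.range ref.length).reverse.find? (fun k => (ref.getD k d).2 == w)
        = (lastMatch w ref).map (·.1) := by
  intro ref
  induction ref with
  | nil => simp [lastMatch]
  | cons x xs ih =>
    rw [List.length_cons, List.range_succ_eq_map]
    simp only [List.reverse_cons, List.find?_append, List.map_reverse.symm, List.find?_map]
    have hpred : ((fun k => (((x :: xs).getD k d).2 == w)) ∘ Nat.succ)
        = fun k => ((xs.getD k d).2 == w) := by
      funext k; simp
    rw [hpred, ih]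
    cases hlm : lastMatch w xs with
    | some p => simp [lastMatch, hlm]
    | none =>
      simp only [lastMatch, hlm, Option.map_none, Option.none_or]
      by_cases hx : x.2 == w
      · simp [hx]
      · simp [hx]

lemma lastMatch_get (w : String) (d : Int × String) :
    ∀ (ref : List (Int × String)) (k : Nat) (e : Int × String),
      lastMatch w ref = some (k, e) → k < ref.length ∧ ref.getD k d = e := by
  intro ref
  induction ref with
  | nil => intro k e h; simp [lastMatch] at h
  | cons x xs ih =>
    intro k e h
    simp only [lastMatch] at h
    cases hlm : lastMatch w xs with
    | some p =>
      rw [hlm] at h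
      obtain ⟨k', e'⟩ := p
      simp at h
      obtain ⟨hk, he⟩ := h
      have := ih k' e' hlm
      subst hk he
      constructor
      · simpa using this.1
      · simpa using this.2
    | none =>
      rw [hlm] at h
      by_cases hx : x.2 == w
      · simp [hx] at h
        obtain ⟨hk, he⟩ := h
        subst hk
        simp [he]
      · simp [hx] at h

lemma findInt (w : String) (d : Int × String) (ref : List (Int × String)) :
    (PySem.List.pyRange 0 (PySem.List.len ref)).reverse.find?
        (fun j => (PySem.List.pyGetD ref j d).2 == w)
      = (lastMatch w ref).map (fun p => ((p.1 : Nat) : Int)) := by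
  rw [PySem.List.len_eq, PySem.List.pyRange_zero_natCast, ← List.map_reverse, List.find?_map]
  have hp : ((fun j : Int => (PySem.List.pyGetD ref j d).2 == w) ∘ (fun k : Nat => (k : Int)))
      = fun k : Nat => ((ref.getD k d).2 == w) := by
    funext k; simp [Function.comp, PySem.List.pyGetD_natCast]
  rw [hp, findNat]
  cases lastMatch w ref <;> simp

lemma eraseIdx_append_cons {α : Type} (p : List α) (x : α) (U : List α) :
    (p ++ x :: U).eraseIdx p.length = p ++ U := by
  induction p with
  | nil => rfl
  | cons a t ih => simp [List.eraseIdx, ih]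

lemma getD_append_self {α : Type} (p : List α) (x : α) (U : List α) (d : α) :
    (p ++ x :: U).getD p.length d = x := by
  induction p with
  | nil => rfl
  | cons a t ih => simpa using ih

lemma foldA (pre : List (Int × String)) :
    ∀ (U ref : List (Int × String)) (wm : List (Int × Int)),
      (idxs pre.length).foldl stepA (pre ++ U, ref, wm)
        = ((greedy pre.reverse ref).2.1 ++ U, (greedy pre.reverse ref).2.2,
           wm ++ (greedy pre.reverse ref).1) := by
  induction pre using List.reverseRecOn with
  | nil => intro U ref wm; simp [idxs, greedy]
  | append_singleton p h ih =>
    intro U ref wm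
    rw [show (p ++ [h]).length = p.length + 1 by simp, idxs_succ, List.foldl_cons]
    have hhyp : (p ++ [h]) ++ U = p ++ (h :: U) := by simp
    have hlen : p.length < (p ++ (h :: U)).length := by simp
    have hget : PySem.List.pyGetD (p ++ (h :: U)) ((p.length : Nat) : Int) ((0 : Int), "") = h := by
      rw [PySem.List.pyGetD_natCast]; exact getD_append_self p h U _
    have hrev : (p ++ [h]).reverse = h :: p.reverse := by simp
    cases hlm : lastMatch h.2 ref with
    | none =>
      have hstep : stepA ((p ++ [h]) ++ U, ref, wm) ((p.length : Nat) : Int)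
          = (p ++ (h :: U), ref, wm) := by
        rw [hhyp]
        simp only [stepA, hget, findInt h.2 ((0 : Int), "") ref, hlm, Option.map_none]
      rw [hstep, ih (h :: U) ref wm, hrev]
      simp only [greedy, hlm]
      simp
    | some ke =>
      obtain ⟨k, e⟩ := ke
      obtain ⟨hk, hke⟩ := lastMatch_get h.2 ((0 : Int), "") ref k e hlm
      have hstep : stepA ((p ++ [h]) ++ U, ref, wm) ((p.length : Nat) : Int)
          = (p ++ U, ref.eraseIdx k, wm ++ [(h.1, e.1)]) := by
        rw [hhyp]
        simp only [stepA, hget, findInt h.2 ((0 : Int), "") ref, hlm, Option.map_some]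
        rw [PySem.List.pop?_natCast _ _ hlen, PySem.List.pop?_natCast _ _ hk]
        simp only [PySem.List.pyGetD_natCast]
        rw [hke, eraseIdx_append_cons]
      rw [hstep, ih U (ref.eraseIdx k) (wm ++ [(h.1, e.1)]), hrev]
      simp only [greedy, hlm]
      simp

lemma A_eq_greedy (h r : List (Int × String)) :
    match_enums_py h r = greedy h.reverse r := by
  unfold match_enums_py
  rw [PySem.List.len_eq, PySem.List.pyRange_zero_natCast, ← List.map_reverse]
  have hfold := foldA h [] r []
  rw [List.append_nil] at hfold
  have hidx : (List.map (fun k : Nat => (k : Int)) (List.range h.length)).reverse = idxs h.length := by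
    unfold idxs; exact List.map_reverse.symm
  rw [← List.map_reverse] at hidx
  rw [hidx, hfold]
  simp

-- ---- B-side lemmas ----

def FW (L : List (Int × (Int × String))) (m : Int → Bool) (w : String) :
    List (Int × (Int × String)) :=
  L.filter (fun p => p.2.2 == w && !(m p.1))

def RR (L : List (Int × (Int × String))) (m : Int → Bool) : List (Int × String) :=
  (L.filter (fun p => !(m p.1))).map (·.2)

def InvB (r : List (Int × String)) (pos : PySem.Dict String (List Int))
    (matched : PySem.Set Int) : Prop :=
  ∀ w, pos.getD w [] =
    (FW (PySem.List.enumerate r) (fun x => PySem.Set.contains matched x) w).map (·.1)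

lemma contains_add (s : PySem.Set Int) (x y : Int) :
    PySem.Set.contains (PySem.Set.add s x) y = (PySem.Set.contains s y || y == x) := by
  by_cases h : y ∈ PySem.Set.add s x
  · have h2 := (PySem.Set.mem_add s x y).mp h
    simp [PySem.Set.contains] at *
    rcases h2 with h2 | h2 <;> simp [h2]
  · have h2 : ¬ (y ∈ s ∨ y = x) := fun hc => h ((PySem.Set.mem_add s x y).mpr hc)
    push_neg at h2
    simp [PySem.Set.contains] at *
    simp [h2.1, h2.2, h]

lemma enum_fst_lt : ∀ (xs : List (Int × String)) (s : Int) (p : Int × (Int × String)),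
    p ∈ PySem.List.enumerate xs s → s ≤ p.1 := by
  intro xs
  induction xs with
  | nil => simp [PySem.List.enumerate_nil]
  | cons x xs ih =>
    intro s p hp
    rw [PySem.List.enumerate_cons] at hp
    rcases List.mem_cons.mp hp with h | h
    · subst h; simp
    · have := ih (s+1) p h; omega

lemma enum_pairwise : ∀ (xs : List (Int × String)) (s : Int),
    (PySem.List.enumerate xs s).Pairwise (fun a b => a.1 < b.1) := by
  intro xs
  induction xs with
  | nil => simp [PySem.List.enumerate_nil]
  | cons x xs ih =>
    intro s
    rw [PySem.List.enumerate_cons]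
    refine List.Pairwise.cons ?_ (ih (s+1))
    intro p hp
    have := enum_fst_lt xs (s+1) p hp
    simp; omega

lemma enum_nodup_fst (xs : List (Int × String)) (s : Int) :
    ((PySem.List.enumerate xs s).map (·.1)).Nodup := by
  have h := enum_pairwise xs s
  rw [List.Nodup, List.pairwise_map]
  exact h.imp (fun hlt => by omega)

lemma enum_mem_getD (d : Int × String) :
    ∀ (xs : List (Int × String)) (s j : Int) (e : Int × String),
      (j, e) ∈ PySem.List.enumerate xs s → PySem.List.pyGetD xs (j - s) d = e := by
  intro xs
  induction xs with
  | nil => simp [PySem.List.enumerate_nil]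
  | cons x xs ih =>
    intro s j e h
    rw [PySem.List.enumerate_cons] at h
    rcases List.mem_cons.mp h with h | h
    · rw [Prod.mk.injEq] at h
      obtain ⟨h1, h2⟩ := h
      subst h1
      simp [PySem.List.pyGetD_zero_cons, h2]
    · have hle := enum_fst_lt xs (s+1) (j, e) h
      have := ih (s+1) j e h
      have hn : j - (s+1) = (((j - s - 1).toNat : Nat) : Int) := by simp at hle; omega
      have hsucc : j - s = (((j - s - 1).toNat + 1 : Nat) : Int) := by simp at hle; push_cast; omega
      rw [hsucc, PySem.List.pyGetD_natCast]
      rw [hn, PySem.List.pyGetD_natCast] at this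
      simpa using this

lemma fst_inj {L : List (Int × (Int × String))} (hnd : (L.map (·.1)).Nodup)
    {j : Int} {a b : Int × String} (ha : (j, a) ∈ L) (hb : (j, b) ∈ L) : a = b := by
  induction L with
  | nil => simp at ha
  | cons x t ih =>
    simp only [List.map_cons, List.nodup_cons] at hnd
    rcases List.mem_cons.mp ha with ha' | ha' <;> rcases List.mem_cons.mp hb with hb' | hb'
    · rw [← ha'] at hb'; exact (Prod.mk.injEq .. ▸ hb').2.symm
    · exfalso; exact hnd.1 (by subst ha'; exact List.mem_map.mpr ⟨(j, b), hb', rfl⟩)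
    · exfalso; exact hnd.1 (by subst hb'; exact List.mem_map.mpr ⟨(j, a), ha', rfl⟩)
    · exact ih hnd.2 ha' hb'

lemma RR_cons (a : Int × (Int × String)) (t : List (Int × (Int × String))) (m : Int → Bool) :
    RR (a :: t) m = if m a.1 then RR t m else a.2 :: RR t m := by
  by_cases h : m a.1 <;> simp [RR, List.filter_cons, h]

lemma FW_cons (a : Int × (Int × String)) (t : List (Int × (Int × String))) (m : Int → Bool) (w : String) :
    FW (a :: t) m w = if (a.2.2 == w && !(m a.1)) then a :: FW t m w else FW t m w := by
  by_cases h : (a.2.2 == w && !(m a.1)) <;> simp [FW, List.filter_cons, h]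

lemma core_none (w : String) :
    ∀ (L : List (Int × (Int × String))) (m : Int → Bool),
      FW L m w = [] → lastMatch w (RR L m) = none := by
  intro L
  induction L with
  | nil => intro m _; simp [RR, lastMatch]
  | cons a t ih =>
    intro m hfw
    rw [FW_cons] at hfw
    cases h : (a.2.2 == w && !(m a.1)) with
    | true => rw [h] at hfw; simp at hfw
    | false =>
      rw [h, if_neg (by simp)] at hfw
      have hrec := ih m hfw
      rw [RR_cons]
      by_cases hm : m a.1
      · simpa [hm] using hrec
      · have hw : (a.2.2 == w) = false := by
          cases hw' : (a.2.2 == w) with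
          | false => rfl
          | true => rw [hw'] at h; simp [hm] at h
        simp [hm, lastMatch, hrec, hw]

lemma core_some :
    ∀ (L : List (Int × (Int × String))) (m : Int → Bool) (w : String) (js : Int)
      (es : Int × String),
      (L.map (·.1)).Nodup → (FW L m w).getLast? = some (js, es) →
      ∃ k, lastMatch w (RR L m) = some (k, es)
        ∧ (RR L m).eraseIdx k = RR L (fun x => m x || x == js)
        ∧ (js, es) ∈ L ∧ es.2 = w ∧ m js = false := by
  intro L
  induction L with
  | nil => intro m w js es _ h; simp [FW] at h
  | cons a t ih =>
    intro m w js es hnd hlast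
    simp only [List.map_cons, List.nodup_cons] at hnd
    rw [FW_cons] at hlast
    cases hfw : FW t m w with
    | cons b bt =>
      -- tail has a match; last of FW (a::t) is last of FW t whether or not a is kept
      have hlast' : (FW t m w).getLast? = some (js, es) := by
        cases h : (a.2.2 == w && !(m a.1)) with
        | true => rw [h, if_pos rfl] at hlast; rwa [hfw, List.getLast?_cons_cons, ← hfw] at hlast
        | false => rwa [h, if_neg (by simp)] at hlast
      obtain ⟨k, hk1, hk2, hk3, hk4, hk5⟩ := ih m w js es hnd.2 hlast'
      have hjs_ne : a.1 ≠ js := by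
        intro hc
        exact hnd.1 (List.mem_map.mpr ⟨(js, es), hk3, by simp [hc]⟩)
      by_cases hm : m a.1
      · refine ⟨k, ?_, ?_, List.mem_cons_of_mem _ hk3, hk4, hk5⟩
        · simpa [RR_cons, hm] using hk1
        · rw [RR_cons, RR_cons, if_pos hm, if_pos (by simp [hm])]
          exact hk2
      · refine ⟨k + 1, ?_, ?_, List.mem_cons_of_mem _ hk3, hk4, hk5⟩
        · rw [RR_cons, if_neg hm]
          simp [lastMatch, hk1]
        · rw [RR_cons, RR_cons, if_neg hm, if_neg (by simp [hm, hjs_ne])]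
          simpa [List.eraseIdx_cons_succ] using hk2
    | nil =>
      -- the head must be the (sole) match
      cases h : (a.2.2 == w && !(m a.1)) with
      | false => rw [h, if_neg (by simp), hfw] at hlast; simp at hlast
      | true =>
        rw [h, if_pos rfl, hfw] at hlast
        have ha : a = (js, es) := by simpa using hlast
        subst ha
        simp only [show ((js, es).2.2 == w && !(m (js, es).1)) = (es.2 == w && !(m js)) from rfl] at h
        simp only [Bool.and_eq_true, beq_iff_eq, Bool.not_eq_eq_eq_not, Bool.not_true] at h
        refine ⟨0, ?_, ?_, List.mem_cons_self .., h.1, h.2⟩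
        · rw [RR_cons, if_neg (by simp [h.2])]
          simp [lastMatch, core_none w t m hfw, h.1]
        · rw [RR_cons, RR_cons, if_neg (by simp [h.2]), if_pos (by simp)]
          rw [List.eraseIdx_cons_zero]
          unfold RR
          congr 1
          apply List.filter_congr
          intro p hp
          have hpne : p.1 ≠ js := by
            intro hc
            exact hnd.1 (List.mem_map.mpr ⟨p, hp, by simp [hc]⟩)
          simp [hpne]

lemma core_inv (L : List (Int × (Int × String))) (m : Int → Bool) (w : String)
    (js : Int) (es : Int × String)
    (hnd : (L.map (·.1)).Nodup) (hlast : (FW L m w).getLast? = some (js, es)) :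
    ∀ w', FW L (fun x => m x || x == js) w'
      = if w' = w then (FW L m w).dropLast else FW L m w' := by
  intro w'
  have hmem : (js, es) ∈ FW L m w := List.mem_of_getLast? hlast
  have hmemL : (js, es) ∈ L := List.mem_of_mem_filter hmem
  have hes : es.2 = w := by
    have := List.of_mem_filter hmem
    simp at this
    exact this.1
  have hstep : ∀ v, FW L (fun x => m x || x == js) v
      = (FW L m v).filter (fun p => !(p.1 == js)) := by
    intro v
    rw [FW, FW, List.filter_filter]
    apply List.filter_congr
    intro p _
    cases h1 : (p.2.2 == v) <;> cases h2 : m p.1 <;> cases h3 : (p.1 == js) <;> rfl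
  rw [hstep]
  by_cases hw : w' = w
  · subst hw
    rw [if_pos rfl]
    obtain hdec := List.dropLast_append_getLast? _ hlast
    have hfnd : ((FW L m w').map (·.1)).Nodup :=
      hnd.sublist (List.Sublist.map _ List.filter_sublist)
    conv_lhs => rw [← hdec]
    rw [List.filter_append]
    have hnotin : js ∉ (FW L m w').dropLast.map (·.1) := by
      rw [← hdec, List.map_append] at hfnd
      have hd := (List.nodup_append.mp hfnd).2.2
      intro hc
      have hj2 : js ∈ List.map (fun x => x.1) [(js, es)] := by simp
      exact (hd js hc js hj2) rfl
    have h1 : (FW L m w').dropLast.filter (fun p => !(p.1 == js)) = (FW L m w').dropLast := by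
      rw [List.filter_eq_self]
      intro p hp
      have : p.1 ≠ js := fun hc => hnotin (List.mem_map.mpr ⟨p, hp, by simp [hc]⟩)
      simp [this]
    rw [h1]
    simp
  · rw [if_neg hw]
    rw [List.filter_eq_self]
    intro p hp
    have hpL : p ∈ L := List.mem_of_mem_filter hp
    have hpw : p.2.2 = w' := by
      have := List.of_mem_filter hp
      simp at this
      exact this.1
    have : p.1 ≠ js := by
      intro hc
      have : p.2 = es := fst_inj hnd (by rw [← hc]; exact (by simpa using hpL)) hmemL
      rw [← hpw, this, hes] at hw
      exact hw rfl
    simp [this]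

lemma map_countdown : ∀ n : Nat,
    (List.range n).map (fun k : Nat => ((n : Int) - 1 - (k : Int))) = idxs n := by
  intro n
  induction n with
  | zero => simp [idxs]
  | succ n ih =>
    rw [List.range_succ_eq_map, List.map_cons, List.map_map, idxs_succ]
    congr 1
    · push_cast; ring
    · rw [← ih]
      apply List.map_congr_left
      intro k _
      simp only [Function.comp]
      push_cast
      ring

lemma foldB (r : List (Int × String)) (pre : List (Int × String)) :
    ∀ (suf : List (Int × String)) (pos : PySem.Dict String (List Int))
      (matched : PySem.Set Int) (wm : List (Int × Int)) (kept : List (Int × String)),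
      InvB r pos matched →
      ∃ pos' matched',
        (idxs pre.length).foldl (stepB (pre ++ suf) r) (pos, wm, kept, matched)
          = (pos', wm ++ (greedy pre.reverse (RR (PySem.List.enumerate r) (fun x => PySem.Set.contains matched x))).1,
             kept ++ (greedy pre.reverse (RR (PySem.List.enumerate r) (fun x => PySem.Set.contains matched x))).2.1.reverse,
             matched')
        ∧ RR (PySem.List.enumerate r) (fun x => PySem.Set.contains matched' x)
            = (greedy pre.reverse (RR (PySem.List.enumerate r) (fun x => PySem.Set.contains matched x))).2.2
        ∧ InvB r pos' matched' := by
  induction pre using List.reverseRecOn with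
  | nil =>
    intro suf pos matched wm kept hinv
    exact ⟨pos, matched, by simp [idxs, greedy], by simp [greedy], hinv⟩
  | append_singleton p h ih =>
    intro suf pos matched wm kept hinv
    have hnd := enum_nodup_fst r 0
    rw [show (p ++ [h]).length = p.length + 1 by simp, idxs_succ, List.foldl_cons]
    have happ : (p ++ [h]) ++ suf = p ++ (h :: suf) := by simp
    have hget : PySem.List.pyGetD ((p ++ [h]) ++ suf) ((p.length : Nat) : Int) ((0 : Int), "") = h := by
      rw [happ, PySem.List.pyGetD_natCast]; exact getD_append_self p h suf _
    have hrev : (p ++ [h]).reverse = h :: p.reverse := by simp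
    cases hstack : pos.getD h.2 [] with
    | nil =>
      have hfw : FW (PySem.List.enumerate r) (fun x => PySem.Set.contains matched x) h.2 = [] := by
        have hx := hinv h.2
        rw [hstack] at hx
        exact List.map_eq_nil_iff.mp hx.symm
      have hlm := core_none h.2 (PySem.List.enumerate r) (fun x => PySem.Set.contains matched x) hfw
      have hstep : stepB ((p ++ [h]) ++ suf) r (pos, wm, kept, matched) ((p.length : Nat) : Int)
          = (pos, wm, kept ++ [h], matched) := by
        simp only [stepB, hget, hstack]
      rw [hstep, happ]
      obtain ⟨pos', matched', h1, h2, h3⟩ := ih (h :: suf) pos matched wm (kept ++ [h]) hinv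
      refine ⟨pos', matched', ?_, ?_, h3⟩
      · rw [h1, hrev]
        simp only [greedy, hlm]
        simp
      · rw [h2, hrev]
        simp only [greedy, hlm]
    | cons x xs =>
      have hmapfw : x :: xs
          = (FW (PySem.List.enumerate r) (fun x => PySem.Set.contains matched x) h.2).map (·.1) := by
        rw [← hinv h.2, hstack]
      obtain ⟨⟨js, es⟩, hq⟩ : ∃ q, (FW (PySem.List.enumerate r) (fun x => PySem.Set.contains matched x) h.2).getLast? = some q := by
        cases hfw' : FW (PySem.List.enumerate r) (fun x => PySem.Set.contains matched x) h.2 with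
        | nil => rw [hfw'] at hmapfw; simp at hmapfw
        | cons b bt => exact ⟨(b :: bt).getLast (by simp), List.getLast?_eq_some_getLast (by simp)⟩
      obtain ⟨k, hk1, hk2, hk3, hk4, hk5⟩ := core_some (PySem.List.enumerate r) (fun x => PySem.Set.contains matched x) h.2 js es hnd hq
      have hj : (x :: xs).getLast (by simp) = js := by
        have hx : (x :: xs).getLast? = some js := by
          rw [hmapfw, List.getLast?_map, hq]; rfl
        rw [List.getLast?_eq_some_getLast (by simp : x :: xs ≠ [])] at hx
        exact Option.some.inj hx
      have hes : PySem.List.pyGetD r js ((0 : Int), "") = es := by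
        have := enum_mem_getD ((0 : Int), "") r 0 js es hk3
        simpa using this
      have hstep : stepB ((p ++ [h]) ++ suf) r (pos, wm, kept, matched) ((p.length : Nat) : Int)
          = (pos.insert h.2 ((x :: xs).dropLast), wm ++ [(h.1, es.1)], kept, PySem.Set.add matched js) := by
        simp only [stepB, hget, hstack, hj, hes]
      have hBW : ∀ w', FW (PySem.List.enumerate r) (fun y => PySem.Set.contains (PySem.Set.add matched js) y) w'
          = FW (PySem.List.enumerate r) (fun y => (PySem.Set.contains matched y || y == js)) w' := by
        intro w'
        unfold FW
        apply List.filter_congr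
        intro q _
        beta_reduce
        rw [contains_add]
      have hci := core_inv (PySem.List.enumerate r) (fun x => PySem.Set.contains matched x) h.2 js es hnd hq
      have hinv' : InvB r (pos.insert h.2 ((x :: xs).dropLast)) (PySem.Set.add matched js) := by
        intro w'
        rw [PySem.Dict.getD_insert, hBW w', hci w']
        by_cases hw' : w' = h.2
        · rw [if_pos hw', if_pos hw', List.map_dropLast, ← hmapfw]
        · rw [if_neg hw', if_neg hw', hinv w']
      have hRRadd : RR (PySem.List.enumerate r) (fun y => PySem.Set.contains (PySem.Set.add matched js) y)
          = (RR (PySem.List.enumerate r) (fun x => PySem.Set.contains matched x)).eraseIdx k := by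
        have hcg : RR (PySem.List.enumerate r) (fun y => PySem.Set.contains (PySem.Set.add matched js) y)
            = RR (PySem.List.enumerate r) (fun y => (PySem.Set.contains matched y || y == js)) := by
          unfold RR
          exact congrArg _ (List.filter_congr (fun q _ => by beta_reduce; rw [contains_add]))
        rw [hcg, ← hk2]
      obtain ⟨pos', matched', h1, h2, h3⟩ := ih (h :: suf) _ _ (wm ++ [(h.1, es.1)]) kept hinv'
      rw [hRRadd] at h1 h2
      refine ⟨pos', matched', ?_, ?_, h3⟩
      · rw [hstep, happ, h1, hrev]
        simp only [greedy, hk1]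
        simp
      · rw [h2, hrev]
        simp only [greedy, hk1]

lemma B_eq_greedy (h r : List (Int × String)) :
    match_enums_py_alt h r = greedy h.reverse r := by
  unfold match_enums_py_alt
  have hidx : PySem.List.pyRange (PySem.List.len h - 1) (-1) (-1) = idxs h.length := by
    rw [PySem.List.len_eq, PySem.List.pyRange_neg_one]
    have ht : (((h.length : Int)) - 1 - (-1)).toNat = h.length := by omega
    rw [ht]
    exact map_countdown h.length
  have hinv0 : InvB r ((PySem.List.enumerate r).foldl
      (fun d p => d.modify p.2.2 [] (· ++ [p.1])) PySem.Dict.empty) PySem.Set.empty := by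
    intro w
    have hfm : (PySem.List.enumerate r).foldl (fun d p => d.modify p.2.2 [] (· ++ [p.1])) PySem.Dict.empty
        = ((PySem.List.enumerate r).map (fun p => (p.2.2, p.1))).foldl
            (fun d q => d.modify q.1 [] (· ++ [q.2])) PySem.Dict.empty := by
      rw [List.foldl_map]
    rw [hfm, PySem.Dict.getD_foldl_modify_append]
    simp only [List.filter_map, List.map_map, Function.comp_def]
    simp [FW, PySem.Set.contains]
  obtain ⟨pos', matched', h1, h2, _⟩ := foldB r h [] _ PySem.Set.empty [] [] hinv0
  rw [List.append_nil] at h1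
  have hRR0 : RR (PySem.List.enumerate r) (fun x => PySem.Set.contains PySem.Set.empty x) = r := by
    simp [RR, PySem.Set.contains, PySem.List.map_snd_enumerate]
  rw [hRR0] at h1 h2
  dsimp only
  rw [hidx, h1]
  simp only [RR] at h2
  beta_reduce at h2
  simp at h2
  simp [h2]

-- ===== VERDICT (by name: the statement is the Claim_ definition above) =====
theorem match_enums_py_spec : Claim_equal_match_enums_py := by
  intro h r _
  unfold Spec_match_enums_py
  rw [A_eq_greedy, B_eq_greedy]
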